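-- pv_equiv track=rewrite | github.com/GNajarro317/Algorithm_Problems | Problem3-Rearrange-Array-Digits/problem_3.py | rearrange_digits
-- ===== SOURCE A (Python) =====
-- import heapq
--
-- def rearrange_digits(input_list):
--     # Create a max heap from the input list
--     heap = [-x for x in input_list]
--     heapq.heapify(heap)
--
--     # Rearrange the digits into two numbers
--     num1 = 0
--     num2 = 0
--     while heap:
--         num1 = num1 * 10 + -heapq.heappop(heap)
--         if heap:
--             num2 = num2 * 10 + -heapq.heappop(heap)
--
--     return num1, num2
-- ===== SOURCE B (Python) =====
-- def rearrange_digits(input_list):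
--     # One descending sort, then build each number from every second position.
--     ordered = sorted(input_list, reverse=True)
--     num1 = 0
--     for i in range(0, len(ordered), 2):
--         num1 = num1 * 10 + ordered[i]
--     num2 = 0
--     for i in range(1, len(ordered), 2):
--         num2 = num2 * 10 + ordered[i]
--     return num1, num2
-- ===== Notes on version B (the rewrite author's own statement) =====
-- stated objective: simpler
-- what changed: Replaces heapify plus a destructive pop-two-per-iteration heap loop by one descending sort followed by two independent stride-2 index passes that fold the even and odd positions into num1 and num2.
import Mathlib
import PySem

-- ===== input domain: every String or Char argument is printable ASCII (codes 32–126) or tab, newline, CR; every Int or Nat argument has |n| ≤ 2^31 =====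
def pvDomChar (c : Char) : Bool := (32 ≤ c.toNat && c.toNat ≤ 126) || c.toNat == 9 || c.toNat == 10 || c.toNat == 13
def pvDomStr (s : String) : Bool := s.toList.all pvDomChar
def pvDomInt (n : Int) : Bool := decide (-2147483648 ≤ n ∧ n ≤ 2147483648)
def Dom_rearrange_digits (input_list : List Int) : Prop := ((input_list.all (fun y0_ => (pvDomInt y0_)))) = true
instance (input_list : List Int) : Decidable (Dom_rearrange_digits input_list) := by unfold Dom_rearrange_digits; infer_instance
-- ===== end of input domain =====

-- B replaces A's heapify + destructive pop-two-per-iteration heap loop by one descending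
-- sort followed by two independent stride-2 index passes (objective: simpler).

-- ===== PORT A =====
-- A uses heapq.heapify / heapq.heappop; PySem has no heapq, so CPython's heapq.py
-- (_siftdown, _siftup, heapify, heappop) is ported by hand below, step for step.
-- List reads use List.getD _ _ 0; this is exact because heapq only reads in-range indices.

-- pv h j = h[j] (in-range reads only)
def pv (h : List Int) (j : Nat) : Int := h.getD j 0

-- small hand-written termination lemmas (cited by the decreasing_by proofs below)
theorem pvDecParent (r j : Nat) (h : r < j) : (j - 1) / 2 < j :=
  Nat.lt_of_le_of_lt (Nat.div_le_self _ 2)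
    (Nat.sub_lt (Nat.lt_of_le_of_lt (Nat.zero_le _) h) Nat.one_pos)

theorem pvLtChild1 (pos : Nat) : pos < 2 * pos + 1 :=
  Nat.lt_succ_of_le (Nat.le_mul_of_pos_left pos Nat.two_pos)

theorem pvLtChild2 (pos : Nat) : pos < 2 * pos + 1 + 1 :=
  Nat.lt_succ_of_lt (pvLtChild1 pos)

theorem pvDecChild (n pos c : Nat) (h : 2 * pos + 1 < n) (hc : pos < c) : n - c < n - pos :=
  Nat.sub_lt_sub_left (Nat.lt_of_lt_of_le (pvLtChild1 pos) (Nat.le_of_lt h)) hc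

-- CPython heapq._siftdown(heap, startpos, pos) with newitem already read out:
-- while pos > startpos: parent = heap[(pos-1)>>1]; if newitem < parent: heap[pos] = parent;
-- pos = (pos-1)>>1 else break; heap[pos] = newitem.  Exact.
def pvSiftdown (h : List Int) (startpos pos : Nat) (newitem : Int) : List Int :=
  if _hp : startpos < pos then
    let parentpos := (pos - 1) / 2
    let parent := pv h parentpos
    if newitem < parent then
      pvSiftdown (h.set pos parent) startpos parentpos newitem
    else h.set pos newitem
  else h.set pos newitem
termination_by pos
decreasing_by exact pvDecParent _ _ _hp

-- CPython heapq._siftup(heap, pos) body loop (newitem = heap[pos] read at entry, startpos = pos):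
-- while 2*pos+1 < len: pick smaller child; heap[pos] = heap[child]; pos = child;
-- then _siftdown(heap, startpos, pos).  Exact.
def pvSiftupLoop (h : List Int) (pos : Nat) (newitem : Int) (startpos : Nat) : List Int :=
  let endpos := h.length
  let childpos := 2 * pos + 1
  if _hc : childpos < endpos then
    let rightpos := childpos + 1
    let childpos' := if rightpos < endpos ∧ ¬ (pv h childpos < pv h rightpos) then rightpos else childpos
    pvSiftupLoop (h.set pos (pv h childpos')) childpos' newitem startpos
  else
    pvSiftdown h startpos pos newitem
termination_by h.length - pos
decreasing_by
  rw [List.length_set]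
  split
  · exact pvDecChild _ _ _ _hc (pvLtChild2 pos)
  · exact pvDecChild _ _ _ _hc (pvLtChild1 pos)

def pvSiftup (h : List Int) (pos : Nat) : List Int :=
  pvSiftupLoop h pos (pv h pos) pos

-- heapq.heapify: for i in reversed(range(n//2)): _siftup(x, i).  Exact.
def pvHeapify (h : List Int) : List Int :=
  (List.range (h.length / 2)).reverse.foldl (fun acc i => pvSiftup acc i) h

-- heapq.heappop (only ever called on a nonempty heap by A's loop):
-- lastelt = heap.pop(); if heap: returnitem = heap[0]; heap[0] = lastelt; _siftup(heap, 0);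
-- return returnitem; return lastelt.  Exact on nonempty heaps.
def pvHeapPop (h : List Int) : Int × List Int :=
  let lastelt := pv h (h.length - 1)
  let rest := h.dropLast
  if rest.isEmpty then (lastelt, rest)
  else (pv rest 0, pvSiftup (rest.set 0 lastelt) 0)

-- A's while loop: while heap: num1 = num1*10 + -heappop(heap); if heap: num2 = num2*10 + -heappop(heap)
-- The loop is ported with a fuel argument bounding the iteration count (fuel = initial heap
-- length; the zero-fuel guard is never reached since each iteration drops the length by 2).
def pvPopLoop : Nat → List Int → Int → Int → Int × Int
  | 0, _, num1, num2 => (num1, num2)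
  | fuel + 1, h, num1, num2 =>
    if h.isEmpty then (num1, num2)
    else
      let x := (pvHeapPop h).1
      let h1 := (pvHeapPop h).2
      let num1' := num1 * 10 + (-x)
      if h1.isEmpty then (num1', num2)
      else
        let y := (pvHeapPop h1).1
        let h2 := (pvHeapPop h1).2
        pvPopLoop fuel h2 num1' (num2 * 10 + (-y))

def rearrange_digits (input_list : List Int) : Int × Int :=
  let heap := pvHeapify (input_list.map (fun x => -x))
  pvPopLoop heap.length heap 0 0

-- ===== PORT B =====
-- Source B: ordered = sorted(input_list, reverse=True); two stride-2 index loops.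
-- ordered[i] is ported as pyGetD _ _ 0; exact because every i produced by the ranges is in bounds.
def rearrange_digits_alt (input_list : List Int) : Int × Int :=
  let ordered := PySem.List.sorted input_list (fun x => x) true
  let num1 := (PySem.List.pyRange 0 (ordered.length : Int) 2).foldl
      (fun acc i => acc * 10 + PySem.List.pyGetD ordered i 0) 0
  let num2 := (PySem.List.pyRange 1 (ordered.length : Int) 2).foldl
      (fun acc i => acc * 10 + PySem.List.pyGetD ordered i 0) 0
  (num1, num2)

-- ===== PRECONDITION & SPEC =====
def Spec_rearrange_digits (input_list : List Int) (out : Int × Int) : Prop := out = rearrange_digits_alt input_list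
instance (input_list : List Int) (out : Int × Int) : Decidable (Spec_rearrange_digits input_list out) := by unfold Spec_rearrange_digits; infer_instance

-- ===== CLAIM (what is proved, stated in full; the proofs are below) =====
def Claim_equal_rearrange_digits : Prop := ∀ (input_list : List Int), Dom_rearrange_digits input_list → Spec_rearrange_digits input_list (rearrange_digits input_list)

-- ===== LEMMAS AND PROOFS =====

-- length of the heap is preserved by the sift operations
theorem pvSiftdown_length (h : List Int) (s p : Nat) (ni : Int) :
    (pvSiftdown h s p ni).length = h.length := by
  unfold pvSiftdown
  dsimp only
  split
  · split
    · rw [pvSiftdown_length, List.length_set]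
    · exact List.length_set
  · exact List.length_set
termination_by p
decreasing_by exact pvDecParent _ _ (by assumption)

theorem pvSiftupLoop_length (h : List Int) (p : Nat) (ni : Int) (s : Nat) :
    (pvSiftupLoop h p ni s).length = h.length := by
  unfold pvSiftupLoop
  dsimp only
  split
  · rw [pvSiftupLoop_length, List.length_set]
  · exact pvSiftdown_length h s p ni
termination_by h.length - p
decreasing_by
  rw [List.length_set]
  split
  · exact pvDecChild _ _ _ (by assumption) (pvLtChild2 p)
  · exact pvDecChild _ _ _ (by assumption) (pvLtChild1 p)

theorem pvHeapPop_length (h : List Int) (hne : h ≠ []) :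
    (pvHeapPop h).2.length = h.length - 1 := by
  unfold pvHeapPop
  by_cases he : h.dropLast.isEmpty <;>
    simp [he, pvSiftup, pvSiftupLoop_length, List.length_set, List.length_dropLast]

-- `c` is a child slot of `p` inside a heap of size `n`
def pvEdge (n p c : Nat) : Prop := (c = 2 * p + 1 ∨ c = 2 * p + 2) ∧ c < n

-- `j` lies in the subtree rooted at `r` (binary-heap index tree)
def pvInSub (r j : Nat) : Bool :=
  if j = r then true else if j ≤ r then false else pvInSub r ((j - 1) / 2)
termination_by j
decreasing_by omega

def PvHeap (h : List Int) : Prop := ∀ p c, pvEdge h.length p c → pv h p ≤ pv h c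

theorem pvInSub_self (r : Nat) : pvInSub r r = true := by unfold pvInSub; simp

theorem le_of_pvInSub (r j : Nat) (hj : pvInSub r j = true) : r ≤ j := by
  fun_induction pvInSub r j <;> simp_all <;> omega

theorem pvInSub_parent (r c : Nat) (h : pvInSub r c = true) (hne : c ≠ r) :
    pvInSub r ((c - 1) / 2) = true := by
  have := le_of_pvInSub r c h
  unfold pvInSub at h
  simp only [hne, if_false] at h
  split at h
  · omega
  · exact h

theorem pvInSub_child (r p c n : Nat) (he : pvEdge n p c) (hp : pvInSub r p = true) :
    pvInSub r c = true := by
  have hrp := le_of_pvInSub r p hp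
  have hc : (c - 1) / 2 = p := by rcases he.1 with h | h <;> omega
  have hcr : c ≠ r := by rcases he.1 with h | h <;> omega
  have hcgt : ¬ c ≤ r := by rcases he.1 with h | h <;> omega
  unfold pvInSub
  simp [hcr, hcgt, hc, hp]

theorem pvInSub_zero (j : Nat) : pvInSub 0 j = true := by
  induction j using Nat.strong_induction_on with
  | _ j ih =>
    unfold pvInSub
    rcases Nat.eq_zero_or_pos j with h | h
    · simp [h]
    · simp only [Nat.le_zero]
      have : j ≠ 0 := by omega
      simp [this, ih ((j-1)/2) (by omega)]

theorem pv_eq_getElem (h : List Int) (j : Nat) (hj : j < h.length) : pv h j = h[j] :=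
  List.getD_eq_getElem h 0 hj

-- x ∈ h ↔ x = pv h j for some j < length (getD form)
theorem mem_iff_pv (h : List Int) (x : Int) : x ∈ h ↔ ∃ j, j < h.length ∧ pv h j = x := by
  simp only [List.mem_iff_getElem]
  constructor
  · rintro ⟨j, hj, rfl⟩; exact ⟨j, hj, pv_eq_getElem h j hj⟩
  · rintro ⟨j, hj, hx⟩; exact ⟨j, hj, by rw [← pv_eq_getElem h j hj]; exact hx⟩

theorem pv_set_eq (h : List Int) (i : Nat) (hi : i < h.length) (a : Int) :
    pv (h.set i a) i = a := by
  simp [pv, List.getD_eq_getElem?_getD, List.getElem?_set_self hi]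

theorem pv_set_ne (h : List Int) (i j : Nat) (hij : i ≠ j) (a : Int) :
    pv (h.set i a) j = pv h j := by
  simp [pv, List.getD_eq_getElem?_getD, List.getElem?_set_ne hij]

theorem set_pv_self (h : List Int) (i : Nat) (hi : i < h.length) : h.set i (pv h i) = h := by
  have := List.set_getElem_self (as := h) (i := i) hi
  rwa [pv, List.getD_eq_getElem h 0 hi]

theorem set_perm_cons_eraseIdx (h : List Int) (i : Nat) (hi : i < h.length) (a : Int) :
    (h.set i a).Perm (a :: h.eraseIdx i) := by
  induction h generalizing i with
  | nil => simp at hi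
  | cons x t ih =>
    cases i with
    | zero => simp
    | succ k =>
      simp only [List.set_cons_succ, List.eraseIdx_cons_succ]
      exact ((ih k (by simpa using hi)).cons x).trans (List.Perm.swap a x _)

theorem cons_set_swap (t : List Int) (k : Nat) (hk : k < t.length) (a b : Int) :
    (a :: t.set k b).Perm (b :: t.set k a) := by
  have h1 := set_perm_cons_eraseIdx t k hk b
  have h2 := set_perm_cons_eraseIdx t k hk a
  exact ((h1.cons a).trans (List.Perm.swap b a _)).trans (h2.cons b).symm

theorem set_set_swap_perm (h : List Int) (i j : Nat) (hi : i < h.length) (hj : j < h.length)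
    (hij : i ≠ j) (a b : Int) :
    ((h.set i a).set j b).Perm ((h.set i b).set j a) := by
  induction h generalizing i j with
  | nil => simp at hi
  | cons x t ih =>
    cases i with
    | zero =>
      cases j with
      | zero => exact absurd rfl hij
      | succ k => simpa using cons_set_swap t k (by simpa using hj) a b
    | succ s =>
      cases j with
      | zero => simpa using cons_set_swap t s (by simpa using hi) b a
      | succ k =>
        simp only [List.set_cons_succ]
        exact (ih s k (by simpa using hi) (by simpa using hj) (by omega)).cons x

-- ===== core sift lemmas =====

theorem edge_parent {n p c : Nat} (he : pvEdge n p c) : (c - 1) / 2 = p := by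
  rcases he.1 with h | h <;> omega

theorem edge_lt {n p c : Nat} (he : pvEdge n p c) : p < c := by
  rcases he.1 with h | h <;> omega

theorem pvSiftdown_eq_rec (h : List Int) (r pos : Nat) (ni : Int)
    (h1 : r < pos) (h2 : ni < pv h ((pos - 1) / 2)) :
    pvSiftdown h r pos ni
      = pvSiftdown (h.set pos (pv h ((pos - 1) / 2))) r ((pos - 1) / 2) ni := by
  conv_lhs => unfold pvSiftdown
  simp [h1, h2]

theorem pvSiftdown_eq_stop (h : List Int) (r pos : Nat) (ni : Int)
    (hs : ¬ r < pos ∨ ¬ ni < pv h ((pos - 1) / 2)) :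
    pvSiftdown h r pos ni = h.set pos ni := by
  conv_lhs => unfold pvSiftdown
  rcases hs with h1 | h2
  · simp [h1]
  · by_cases h1 : r < pos <;> simp [h1, h2]

theorem pvSiftdown_spec (h : List Int) (r pos : Nat) (ni : Int)
    (hlen : pos < h.length) (hin : pvInSub r pos = true)
    (hJ3 : ∀ p c, pvEdge h.length p c → pvInSub r p = true → p ≠ pos → pv h p ≤ pv h c)
    (hJ4 : pos ≠ r → ∀ c, pvEdge h.length pos c → pv h ((pos - 1) / 2) ≤ pv h c)
    (hJ5 : ∀ c, pvEdge h.length pos c → ni ≤ pv h c) :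
    (pvSiftdown h r pos ni).length = h.length ∧
    (pvSiftdown h r pos ni).Perm (h.set pos ni) ∧
    (∀ j, pvInSub r j = false → pv (pvSiftdown h r pos ni) j = pv h j) ∧
    (∀ p c, pvEdge h.length p c → pvInSub r p = true →
      pv (pvSiftdown h r pos ni) p ≤ pv (pvSiftdown h r pos ni) c) := by
  by_cases hstop : ¬ r < pos ∨ ¬ ni < pv h ((pos - 1) / 2)
  · rw [pvSiftdown_eq_stop h r pos ni hstop]
    refine ⟨by simp, List.Perm.refl _, ?_, ?_⟩
    · intro j hj
      have hjp : pos ≠ j := by rintro rfl; rw [hin] at hj; cases hj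
      exact pv_set_ne h pos j hjp ni
    · intro p c he hsubp
      have hcp := edge_lt he
      by_cases hppos : p = pos
      · subst hppos
        rw [pv_set_eq h p hlen ni, pv_set_ne h p c (by omega) ni]
        exact hJ5 c he
      · rw [pv_set_ne h pos p (fun x => hppos x.symm) ni]
        by_cases hcpos : c = pos
        · subst hcpos
          have hpq : p = (c - 1) / 2 := (edge_parent he).symm
          rcases hstop with h1 | h2
          · have h1' := le_of_pvInSub r p hsubp
            have h2' := le_of_pvInSub r c hin
            omega
          · rw [pv_set_eq h c hlen ni, hpq]
            omega
        · rw [pv_set_ne h pos c (fun x => hcpos x.symm) ni]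
          exact hJ3 p c he hsubp hppos
  · push_neg at hstop
    obtain ⟨hp, hlt⟩ := hstop
    rw [pvSiftdown_eq_rec h r pos ni hp hlt]
    have hpos1 : 1 ≤ pos := by omega
    have hpplt : (pos - 1) / 2 < pos := by omega
    have hpplen : (pos - 1) / 2 < h.length := by omega
    have hinpp : pvInSub r ((pos - 1) / 2) = true := pvInSub_parent r pos hin (by omega)
    have hppne : pos ≠ (pos - 1) / 2 := by omega
    obtain ⟨L, P, U, H4⟩ := pvSiftdown_spec (h.set pos (pv h ((pos - 1) / 2))) r
        ((pos - 1) / 2) ni (by simpa using hpplen) hinpp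
      (by -- J3
        simp only [List.length_set]
        intro p c he hsubp hne
        have hcp := edge_lt he
        by_cases hppos : p = pos
        · subst hppos
          rw [pv_set_eq h p hlen, pv_set_ne h p c (by omega)]
          exact le_trans (le_of_eq rfl) (hJ4 (by omega) c he)
        · rw [pv_set_ne h pos p (fun x => hppos x.symm)]
          by_cases hcpos : c = pos
          · subst hcpos
            exact absurd ((edge_parent he).symm.trans rfl) (by rw [edge_parent he] at hne ⊢; exact fun hx => hne (by omega))
          · rw [pv_set_ne h pos c (fun x => hcpos x.symm)]
            exact hJ3 p c he hsubp hppos)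
      (by -- J4
        simp only [List.length_set]
        intro hner c he
        have hpp1 : 1 ≤ (pos - 1) / 2 := by
          have := le_of_pvInSub r _ hinpp
          omega
        have hgplt : ((pos - 1) / 2 - 1) / 2 < (pos - 1) / 2 := by omega
        have hgpne : pos ≠ ((pos - 1) / 2 - 1) / 2 := by omega
        rw [pv_set_ne h pos _ hgpne]
        have hedge_gp : pvEdge h.length (((pos - 1) / 2 - 1) / 2) ((pos - 1) / 2) :=
          ⟨by omega, by omega⟩
        have hsub_gp : pvInSub r (((pos - 1) / 2 - 1) / 2) = true :=
          pvInSub_parent r _ hinpp hner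
        have h1 : pv h (((pos - 1) / 2 - 1) / 2) ≤ pv h ((pos - 1) / 2) :=
          hJ3 _ _ hedge_gp hsub_gp (by omega)
        by_cases hc : c = pos
        · subst hc
          rw [pv_set_eq h c hlen]
          exact h1
        · rw [pv_set_ne h pos c (fun x => hc x.symm)]
          have hcne : (pos - 1) / 2 ≠ pos := by omega
          have h2 : pv h ((pos - 1) / 2) ≤ pv h c := hJ3 _ _ he hinpp hcne
          exact le_trans h1 h2)
      (by -- J5
        simp only [List.length_set]
        intro c he
        by_cases hc : c = pos
        · subst hc
          rw [pv_set_eq h c hlen]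
          omega
        · rw [pv_set_ne h pos c (fun x => hc x.symm)]
          have h2 : pv h ((pos - 1) / 2) ≤ pv h c := hJ3 _ _ he hinpp (by omega)
          omega)
    refine ⟨by simpa using L, ?_, ?_, ?_⟩
    · -- permutation
      refine P.trans ?_
      have hswap := set_set_swap_perm h pos ((pos - 1) / 2) hlen hpplen hppne
        (pv h ((pos - 1) / 2)) ni
      refine hswap.trans ?_
      have hval : pv (h.set pos ni) ((pos - 1) / 2) = pv h ((pos - 1) / 2) :=
        pv_set_ne h pos _ hppne ni
      rw [← hval, set_pv_self (h.set pos ni) _ (by simpa using hpplen)]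
    · intro j hj
      have hjp : pos ≠ j := by rintro rfl; rw [hin] at hj; cases hj
      rw [U j hj, pv_set_ne h pos j hjp]
    · intro p c he hsubp
      exact H4 p c (by simpa [List.length_set] using he) hsubp
termination_by pos

theorem pvSiftupLoop_eq_rec (h : List Int) (pos : Nat) (ni : Int) (s : Nat)
    (hc : 2 * pos + 1 < h.length) :
    pvSiftupLoop h pos ni s
      = pvSiftupLoop
          (h.set pos (pv h (if 2 * pos + 1 + 1 < h.length ∧ ¬ (pv h (2 * pos + 1) < pv h (2 * pos + 1 + 1)) then 2 * pos + 1 + 1 else 2 * pos + 1)))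
          (if 2 * pos + 1 + 1 < h.length ∧ ¬ (pv h (2 * pos + 1) < pv h (2 * pos + 1 + 1)) then 2 * pos + 1 + 1 else 2 * pos + 1)
          ni s := by
  conv_lhs => unfold pvSiftupLoop
  simp [hc]

theorem pvSiftupLoop_eq_base (h : List Int) (pos : Nat) (ni : Int) (s : Nat)
    (hc : ¬ 2 * pos + 1 < h.length) :
    pvSiftupLoop h pos ni s = pvSiftdown h s pos ni := by
  conv_lhs => unfold pvSiftupLoop
  simp [hc]

theorem pvSiftupLoop_spec (h : List Int) (pos : Nat) (ni : Int) (r : Nat)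
    (hlen : pos < h.length) (hin : pvInSub r pos = true)
    (hK3 : ∀ p c, pvEdge h.length p c → pvInSub r p = true → p ≠ pos → pv h p ≤ pv h c)
    (hK4 : pos ≠ r → ∀ c, pvEdge h.length pos c → pv h ((pos - 1) / 2) ≤ pv h c) :
    (pvSiftupLoop h pos ni r).length = h.length ∧
    (pvSiftupLoop h pos ni r).Perm (h.set pos ni) ∧
    (∀ j, pvInSub r j = false → pv (pvSiftupLoop h pos ni r) j = pv h j) ∧
    (∀ p c, pvEdge h.length p c → pvInSub r p = true →
      pv (pvSiftupLoop h pos ni r) p ≤ pv (pvSiftupLoop h pos ni r) c) := by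
  by_cases hc : 2 * pos + 1 < h.length
  · rw [pvSiftupLoop_eq_rec h pos ni r hc]
    simp only [show 2 * pos + 2 = 2 * pos + 2 by omega]
    have hrange : (if 2 * pos + 2 < h.length ∧ ¬ (pv h (2 * pos + 1) < pv h (2 * pos + 2)) then 2 * pos + 2 else 2 * pos + 1) = 2 * pos + 1
        ∨ (if 2 * pos + 2 < h.length ∧ ¬ (pv h (2 * pos + 1) < pv h (2 * pos + 2)) then 2 * pos + 2 else 2 * pos + 1) = 2 * pos + 2 := by
      split
      · right; rfl
      · left; rfl
    generalize hcdef : (if 2 * pos + 2 < h.length ∧ ¬ (pv h (2 * pos + 1) < pv h (2 * pos + 2)) then 2 * pos + 2 else 2 * pos + 1) = c' at *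
    have hc'lt : c' < h.length := by
      subst hcdef
      split
      · next hcond => omega
      · omega
    have hc'gt : pos < c' := by omega
    have hc'edge : pvEdge h.length pos c' := ⟨by omega, hc'lt⟩
    have hmin : ∀ c, pvEdge h.length pos c → pv h c' ≤ pv h c := by
      intro c he
      subst hcdef
      rcases he.1 with rfl | rfl
      · split
        · next hcond => omega
        · exact le_refl _
      · split
        · next hcond => exact le_refl _
        · next hcond =>
          push_neg at hcond
          have := hcond he.2
          omega
    clear hcdef hrange
    have hinc' : pvInSub r c' = true := pvInSub_child r pos c' h.length hc'edge hin
    have hnec' : pos ≠ c' := by omega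
    obtain ⟨L, P, U, H4⟩ := pvSiftupLoop_spec (h.set pos (pv h c')) c' ni r
        (by simpa using hc'lt) hinc'
      (by -- K3
        simp only [List.length_set]
        intro p c he hsubp hne
        have hcp := edge_lt he
        by_cases hppos : p = pos
        · subst hppos
          rw [pv_set_eq h p hlen, pv_set_ne h p c (by omega)]
          exact hmin c he
        · rw [pv_set_ne h pos p (fun x => hppos x.symm)]
          by_cases hcpos : c = pos
          · subst hcpos
            have hpq : p = (c - 1) / 2 := (edge_parent he).symm
            have hcner : c ≠ r := by
              have := le_of_pvInSub r p hsubp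
              omega
            rw [pv_set_eq h c hlen]
            rw [hpq]
            exact hK4 hcner c' hc'edge
          · rw [pv_set_ne h pos c (fun x => hcpos x.symm)]
            exact hK3 p c he hsubp hppos)
      (by -- K4
        simp only [List.length_set]
        intro hner d he
        have hdgt : c' < d := edge_lt he
        have hpar : (c' - 1) / 2 = pos := by rcases hc'edge.1 with hx | hx <;> omega
        rw [hpar, pv_set_eq h pos hlen, pv_set_ne h pos d (by omega)]
        exact hK3 c' d he hinc' (by omega))
    refine ⟨by simpa using L, ?_, ?_, ?_⟩
    · refine P.trans ?_
      have hswap := set_set_swap_perm h pos c' hlen hc'lt hnec' (pv h c') ni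
      refine hswap.trans ?_
      have hval : pv (h.set pos ni) c' = pv h c' := pv_set_ne h pos c' hnec' ni
      rw [← hval, set_pv_self (h.set pos ni) c' (by simpa using hc'lt)]
    · intro j hj
      have hjp : pos ≠ j := by rintro rfl; rw [hin] at hj; cases hj
      rw [U j hj, pv_set_ne h pos j hjp]
    · intro p c he hsubp
      exact H4 p c (by simpa [List.length_set] using he) hsubp
  · rw [pvSiftupLoop_eq_base h pos ni r hc]
    exact pvSiftdown_spec h r pos ni hlen hin hK3 hK4
      (by intro c he; rcases he.1 with hx | hx <;> [skip; skip] <;> exact absurd he.2 (by omega))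
termination_by h.length - pos
decreasing_by
  simp only [List.length_set]
  omega

theorem pvSiftup_spec (h : List Int) (pos : Nat)
    (hlen : pos < h.length)
    (hpre : ∀ p c, pvEdge h.length p c → pvInSub pos p = true → p ≠ pos → pv h p ≤ pv h c) :
    (pvSiftup h pos).length = h.length ∧
    (pvSiftup h pos).Perm h ∧
    (∀ j, pvInSub pos j = false → pv (pvSiftup h pos) j = pv h j) ∧
    (∀ p c, pvEdge h.length p c → pvInSub pos p = true →
      pv (pvSiftup h pos) p ≤ pv (pvSiftup h pos) c) := by
  have := pvSiftupLoop_spec h pos (pv h pos) pos hlen (pvInSub_self pos) hpre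
    (by intro hne; exact absurd rfl hne)
  rw [set_pv_self h pos hlen] at this
  exact this

theorem pvHeapify_aux (m : Nat) (h : List Int) (hm : 2 * m ≤ h.length)
    (hpre : ∀ p c, pvEdge h.length p c → m ≤ p → pv h p ≤ pv h c) :
    ((List.range m).reverse.foldl (fun acc i => pvSiftup acc i) h).length = h.length ∧
    ((List.range m).reverse.foldl (fun acc i => pvSiftup acc i) h).Perm h ∧
    PvHeap ((List.range m).reverse.foldl (fun acc i => pvSiftup acc i) h) := by
  induction m generalizing h with
  | zero =>
    refine ⟨rfl, List.Perm.refl _, ?_⟩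
    intro p c he
    exact hpre p c he (Nat.zero_le p)
  | succ m ih =>
    rw [List.range_succ, List.reverse_append, List.reverse_singleton, List.singleton_append,
      List.foldl_cons]
    obtain ⟨L, P, U, H4⟩ := pvSiftup_spec h m (by omega)
      (by
        intro p c he hsub hne
        have := le_of_pvInSub m p hsub
        exact hpre p c he (by omega))
    obtain ⟨L', P', H'⟩ := ih (pvSiftup h m) (by omega)
      (by
        intro p c he hmp
        rw [L] at he
        by_cases hsub : pvInSub m p = true
        · exact H4 p c he hsub
        · have hsub' : pvInSub m p = false := by simpa using hsub
          have hpm : p ≠ m := by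
            rintro rfl
            rw [pvInSub_self] at hsub'
            cases hsub'
          have hsubc : pvInSub m c = false := by
            by_contra hx
            have hx' : pvInSub m c = true := by simpa using hx
            have hcm : c ≠ m := by
              have := edge_lt he
              omega
            have hpp := pvInSub_parent m c hx' hcm
            rw [edge_parent he] at hpp
            rw [hpp] at hsub'
            cases hsub'
          rw [U p hsub', U c hsubc]
          exact hpre p c he (by omega))
    refine ⟨L'.trans L, P'.trans P, H'⟩

theorem pvHeapify_spec (h : List Int) :
    (pvHeapify h).length = h.length ∧ (pvHeapify h).Perm h ∧ PvHeap (pvHeapify h) := by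
  unfold pvHeapify
  exact pvHeapify_aux (h.length / 2) h (by omega)
    (by
      intro p c he hp
      rcases he.1 with hx | hx <;> (exfalso; have := he.2; omega))

theorem pvHeap_root_min (h : List Int) (hh : PvHeap h) : ∀ y ∈ h, pv h 0 ≤ y := by
  have key : ∀ j, j < h.length → pv h 0 ≤ pv h j := by
    intro j
    induction j using Nat.strong_induction_on with
    | _ j ihj =>
      intro hj
      rcases Nat.eq_zero_or_pos j with rfl | hjpos
      · exact le_refl _
      · have hedge : pvEdge h.length ((j - 1) / 2) j := ⟨by omega, hj⟩
        exact le_trans (ihj ((j - 1) / 2) (by omega) (by omega)) (hh _ j hedge)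
  intro y hy
  obtain ⟨j, hj, rfl⟩ := (mem_iff_pv h y).mp hy
  exact key j hj

theorem pv_dropLast (h : List Int) (j : Nat) (hj : j < h.length - 1) :
    pv h.dropLast j = pv h j := by
  rw [pv_eq_getElem _ j (by simp; omega), pv_eq_getElem h j (by omega), List.getElem_dropLast]

theorem pvHeapPop_eq_one (h : List Int) (hre : h.dropLast.isEmpty) :
    pvHeapPop h = (pv h (h.length - 1), h.dropLast) := by
  unfold pvHeapPop
  simp [hre]

theorem pvHeapPop_eq_big (h : List Int) (hre : ¬ h.dropLast.isEmpty) :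
    pvHeapPop h = (pv h.dropLast 0, pvSiftup (h.dropLast.set 0 (pv h (h.length - 1))) 0) := by
  unfold pvHeapPop
  simp [hre]

theorem pvHeapPop_spec (h : List Int) (hne : h ≠ []) (hh : PvHeap h) :
    PvHeap (pvHeapPop h).2 ∧ ((pvHeapPop h).1 :: (pvHeapPop h).2).Perm h ∧
    (∀ y ∈ h, (pvHeapPop h).1 ≤ y) := by
  have hn : 1 ≤ h.length := by
    cases h
    · exact absurd rfl hne
    · simp
  by_cases hre : h.dropLast.isEmpty
  · -- h has exactly one element
    rw [pvHeapPop_eq_one h hre]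
    have hlen1 : h.length = 1 := by
      have h0 := List.isEmpty_iff.mp hre
      have := congrArg List.length h0
      simp at this
      omega
    have hform : h = [pv h 0] := by
      rcases h with _ | ⟨x, t⟩
      · exact absurd rfl hne
      · have : t = [] := by simpa using hlen1
        subst this
        rfl
    refine ⟨?_, ?_, ?_⟩
    · intro p c he
      exact absurd he.2 (by simp [List.isEmpty_iff.mp hre])
    · rw [List.isEmpty_iff.mp hre, hlen1]
      conv_rhs => rw [hform]
    · intro y hy
      rw [hform] at hy
      simp at hy
      simp [hy, hlen1]
  · -- h has at least two elements
    rw [pvHeapPop_eq_big h hre]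
    have hrl : h.dropLast.length = h.length - 1 := by simp
    have hrne : h.dropLast ≠ [] := by simpa [List.isEmpty_iff] using hre
    have hn2 : 2 ≤ h.length := by
      have := List.length_pos_iff.mpr hrne
      omega
    obtain ⟨a, t, hat⟩ : ∃ a t, h.dropLast = a :: t := by
      rcases hx : h.dropLast with _ | ⟨a, t⟩
      · exact absurd hx hrne
      · exact ⟨a, t, rfl⟩
    have ha : a = pv h 0 := by
      have : pv h.dropLast 0 = a := by rw [hat]; rfl
      rw [← this, pv_dropLast h 0 (by omega)]
    have hset : h.dropLast.set 0 (pv h (h.length - 1)) = pv h (h.length - 1) :: t := by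
      rw [hat]
      rfl
    have hpre : ∀ p c, pvEdge (h.dropLast.set 0 (pv h (h.length - 1))).length p c →
        pvInSub 0 p = true → p ≠ 0 →
        pv (h.dropLast.set 0 (pv h (h.length - 1))) p ≤ pv (h.dropLast.set 0 (pv h (h.length - 1))) c := by
      intro p c he _ hpne
      have hcp := edge_lt he
      have hcl : c < h.length - 1 := by
        have := he.2
        simpa [hrl] using this
      have hpl : p < h.length - 1 := by omega
      rw [pv_set_ne h.dropLast 0 p (fun x => hpne x.symm), pv_set_ne h.dropLast 0 c (by omega),
        pv_dropLast h p hpl, pv_dropLast h c hcl]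
      exact hh p c ⟨he.1, by omega⟩
    obtain ⟨L, P, U, H4⟩ := pvSiftup_spec (h.dropLast.set 0 (pv h (h.length - 1))) 0
      (by simp [hrl]; omega) hpre
    refine ⟨?_, ?_, ?_⟩
    · intro p c he
      rw [L] at he
      exact H4 p c he (pvInSub_zero p)
    · -- permutation
      have hfull : h = h.dropLast ++ [pv h (h.length - 1)] := by
        have h1 : h.dropLast ++ [h.getLast hne] = h := List.dropLast_concat_getLast hne
        have h2 : h.getLast hne = pv h (h.length - 1) := by
          rw [List.getLast_eq_getElem, pv_eq_getElem h _ (by omega)]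
        rw [← h2, h1]
      have step1 : (pv h.dropLast 0 :: pvSiftup (h.dropLast.set 0 (pv h (h.length - 1))) 0).Perm
          (pv h.dropLast 0 :: pv h (h.length - 1) :: t) := by
        refine List.Perm.cons _ ?_
        refine P.trans ?_
        rw [hset]
      refine step1.trans ?_
      have step2 : (pv h.dropLast 0 :: pv h (h.length - 1) :: t).Perm
          (pv h.dropLast 0 :: (t ++ [pv h (h.length - 1)])) :=
        List.Perm.cons _ (List.perm_append_singleton _ t).symm
      refine step2.trans ?_
      have hpv0 : pv h.dropLast 0 = a := by rw [hat]; rfl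
      rw [hpv0]
      have : a :: (t ++ [pv h (h.length - 1)]) = (a :: t) ++ [pv h (h.length - 1)] := rfl
      rw [this, ← hat, ← hfull]
    · intro y hy
      rw [pv_dropLast h 0 (by omega)]
      exact pvHeap_root_min h hh y hy

-- ===== pop sequence =====

def pvPopSeq (h : List Int) : List Int :=
  if _h : h.isEmpty then [] else (pvHeapPop h).1 :: pvPopSeq (pvHeapPop h).2
termination_by h.length
decreasing_by
  have := pvHeapPop_length h (by simpa [List.isEmpty_iff] using _h)
  have : h.length ≠ 0 := by simpa [List.isEmpty_iff, List.length_eq_zero_iff] using _h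
  omega

theorem pvPopSeq_eq_nil (h : List Int) (he : h.isEmpty) : pvPopSeq h = [] := by
  unfold pvPopSeq
  simp [he]

theorem pvPopSeq_eq_cons (h : List Int) (he : ¬ h.isEmpty) :
    pvPopSeq h = (pvHeapPop h).1 :: pvPopSeq (pvHeapPop h).2 := by
  conv_lhs => unfold pvPopSeq
  simp [he]

theorem pvPopSeq_spec (h : List Int) (hh : PvHeap h) :
    (pvPopSeq h).Perm h ∧ (pvPopSeq h).Pairwise (· ≤ ·) := by
  by_cases he : h.isEmpty
  · rw [pvPopSeq_eq_nil h he, List.isEmpty_iff.mp he]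
    exact ⟨List.Perm.refl _, List.Pairwise.nil⟩
  · have hne : h ≠ [] := by simpa [List.isEmpty_iff] using he
    rw [pvPopSeq_eq_cons h he]
    obtain ⟨HH, HP, HM⟩ := pvHeapPop_spec h hne hh
    have hlt : (pvHeapPop h).2.length < h.length := by
      have := pvHeapPop_length h hne
      have : h.length ≠ 0 := by simpa [← List.length_eq_zero_iff] using hne
      omega
    obtain ⟨P', S'⟩ := pvPopSeq_spec (pvHeapPop h).2 HH
    refine ⟨(P'.cons _).trans HP, List.pairwise_cons.mpr ⟨?_, S'⟩⟩
    intro z hz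
    have hz2 : z ∈ (pvHeapPop h).2 := P'.mem_iff.mp hz
    exact HM z (HP.mem_iff.mp (List.mem_cons_of_mem _ hz2))
termination_by h.length

def altF : List Int → Int → Int → Int × Int
  | [], n1, n2 => (n1, n2)
  | x :: t, n1, n2 =>
    match t with
    | [] => (n1 * 10 + (-x), n2)
    | y :: t' => altF t' (n1 * 10 + (-x)) (n2 * 10 + (-y))

theorem pvPopLoop_eq_altF (fuel : Nat) (h : List Int) (hf : h.length ≤ fuel) (n1 n2 : Int) :
    pvPopLoop fuel h n1 n2 = altF (pvPopSeq h) n1 n2 := by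
  induction fuel generalizing h n1 n2 with
  | zero =>
    have h0 : h = [] := by
      rw [← List.length_eq_zero_iff]
      omega
    subst h0
    rw [pvPopSeq_eq_nil [] rfl]
    rfl
  | succ fuel ih =>
    by_cases he : h.isEmpty
    · rw [pvPopSeq_eq_nil h he]
      simp [pvPopLoop, he]
      rfl
    · have hne : h ≠ [] := by simpa [List.isEmpty_iff] using he
      have l1 : (pvHeapPop h).2.length = h.length - 1 := pvHeapPop_length h hne
      rw [pvPopSeq_eq_cons h he]
      by_cases he2 : (pvHeapPop h).2.isEmpty
      · rw [pvPopSeq_eq_nil _ he2]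
        simp [pvPopLoop, he, he2]
        rfl
      · have hne2 : (pvHeapPop h).2 ≠ [] := by simpa [List.isEmpty_iff] using he2
        have l2 : (pvHeapPop (pvHeapPop h).2).2.length = (pvHeapPop h).2.length - 1 :=
          pvHeapPop_length _ hne2
        have hlen1 : (pvHeapPop h).2.length ≠ 0 := by
          simpa [← List.length_eq_zero_iff] using hne2
        rw [pvPopSeq_eq_cons _ he2]
        show (if h.isEmpty then (n1, n2) else _) = _
        rw [if_neg (by simpa using he), if_neg (by simpa using he2)]
        rw [ih _ (by omega)]
        rfl

-- even/odd positional halves of the descending list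
def pvEvens : List Int → List Int
  | [] => []
  | [x] => [x]
  | x :: _ :: t => x :: pvEvens t

def pvOdds : List Int → List Int
  | [] => []
  | [_] => []
  | _ :: y :: t => y :: pvOdds t

theorem altF_eq (s : List Int) (n1 n2 : Int) :
    altF s n1 n2 = ((pvEvens (s.map (fun x => -x))).foldl (fun a x => a * 10 + x) n1,
                    (pvOdds (s.map (fun x => -x))).foldl (fun a x => a * 10 + x) n2) := by
  fun_induction altF s n1 n2 with
  | case1 n1 n2 => simp [pvEvens, pvOdds]
  | case2 n1 n2 x => simp [pvEvens, pvOdds]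
  | case3 n1 n2 x y t ih => simpa [pvEvens, pvOdds] using ih

theorem pyRange_zero_two (n : Nat) :
    PySem.List.pyRange 0 (n : Int) 2
      = (List.range ((n + 1) / 2)).map (fun k : Nat => ((2 * k : Nat) : Int)) := by
  unfold PySem.List.pyRange
  rw [if_neg (by norm_num : ¬ (2 : Int) = 0), if_pos (by norm_num : (0 : Int) < 2)]
  have hcount : (if (0 : Int) < (n : Int) then (((n : Int) - 0 + 2 - 1) / 2).toNat else 0)
      = (n + 1) / 2 := by
    split <;> omega
  rw [hcount]
  show List.map (fun k : Nat => (0 : Int) + 2 * (k : Int)) (List.range ((n + 1) / 2)) = _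
  apply List.map_congr_left
  intro k _
  push_cast
  ring

theorem pyRange_one_two (n : Nat) :
    PySem.List.pyRange 1 (n : Int) 2
      = (List.range (n / 2)).map (fun k : Nat => ((2 * k + 1 : Nat) : Int)) := by
  unfold PySem.List.pyRange
  rw [if_neg (by norm_num : ¬ (2 : Int) = 0), if_pos (by norm_num : (0 : Int) < 2)]
  have hcount : (if (1 : Int) < (n : Int) then (((n : Int) - 1 + 2 - 1) / 2).toNat else 0)
      = n / 2 := by
    split <;> omega
  rw [hcount]
  show List.map (fun k : Nat => (1 : Int) + 2 * (k : Int)) (List.range (n / 2)) = _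
  apply List.map_congr_left
  intro k _
  push_cast
  ring

theorem fold_evens_aux (d : List Int) (n1 : Int) :
    (List.range ((d.length + 1) / 2)).foldl
        (fun acc k => acc * 10 + PySem.List.pyGetD d ((2 * k : Nat) : Int) 0) n1
      = (pvEvens d).foldl (fun a x => a * 10 + x) n1 := by
  match d with
  | [] => simp [pvEvens]
  | [x] =>
    have h0 : PySem.List.pyGetD [x] ((2 * 0 : Nat) : Int) 0 = x := by
      rw [PySem.List.pyGetD_natCast]
      norm_num
    simp only [List.length_cons, List.length_nil]
    rw [show (0 + 1 + 1) / 2 = 1 by norm_num, List.range_one, List.foldl_cons, h0,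
      List.foldl_nil]
    rfl
  | x :: y :: t =>
    have hlen : ((x :: y :: t).length + 1) / 2 = (t.length + 1) / 2 + 1 := by
      simp
      omega
    rw [hlen, List.range_succ_eq_map, List.foldl_cons]
    have h0 : PySem.List.pyGetD (x :: y :: t) ((2 * 0 : Nat) : Int) 0 = x := by
      rw [PySem.List.pyGetD_natCast]
      norm_num
    rw [h0, List.foldl_map]
    have hfun : (fun (acc : Int) (k : Nat) =>
          acc * 10 + PySem.List.pyGetD (x :: y :: t) ((2 * (k.succ) : Nat) : Int) 0)
        = (fun (acc : Int) (k : Nat) =>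
          acc * 10 + PySem.List.pyGetD t ((2 * k : Nat) : Int) 0) := by
      funext acc k
      rw [PySem.List.pyGetD_natCast, PySem.List.pyGetD_natCast,
        show 2 * k.succ = (2 * k + 1) + 1 by omega, List.getD_cons_succ,
        List.getD_cons_succ]
    rw [show pvEvens (x :: y :: t) = x :: pvEvens t from rfl, List.foldl_cons]
    rw [← fold_evens_aux t (n1 * 10 + x)]
    exact congrFun (congrFun (congrArg List.foldl hfun) (n1 * 10 + x)) _

theorem fold_odds_aux (d : List Int) (n2 : Int) :
    (List.range (d.length / 2)).foldl
        (fun acc k => acc * 10 + PySem.List.pyGetD d ((2 * k + 1 : Nat) : Int) 0) n2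
      = (pvOdds d).foldl (fun a x => a * 10 + x) n2 := by
  match d with
  | [] => simp [pvOdds]
  | [x] => simp [pvOdds]
  | x :: y :: t =>
    have hlen : (x :: y :: t).length / 2 = t.length / 2 + 1 := by
      simp
      omega
    rw [hlen, List.range_succ_eq_map, List.foldl_cons]
    have h0 : PySem.List.pyGetD (x :: y :: t) ((2 * 0 + 1 : Nat) : Int) 0 = y := by
      rw [PySem.List.pyGetD_natCast]
      norm_num
    rw [h0, List.foldl_map]
    have hfun : (fun (acc : Int) (k : Nat) =>
          acc * 10 + PySem.List.pyGetD (x :: y :: t) ((2 * (k.succ) + 1 : Nat) : Int) 0)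
        = (fun (acc : Int) (k : Nat) =>
          acc * 10 + PySem.List.pyGetD t ((2 * k + 1 : Nat) : Int) 0) := by
      funext acc k
      rw [PySem.List.pyGetD_natCast, PySem.List.pyGetD_natCast,
        show 2 * k.succ + 1 = (2 * k + 1 + 1) + 1 by omega, List.getD_cons_succ,
        List.getD_cons_succ]
    rw [show pvOdds (x :: y :: t) = y :: pvOdds t from rfl, List.foldl_cons]
    rw [← fold_odds_aux t (n2 * 10 + y)]
    exact congrFun (congrFun (congrArg List.foldl hfun) (n2 * 10 + y)) _

theorem fold_range_evens (d : List Int) (n1 : Int) :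
    (PySem.List.pyRange 0 (d.length : Int) 2).foldl
        (fun acc i => acc * 10 + PySem.List.pyGetD d i 0) n1
      = (pvEvens d).foldl (fun a x => a * 10 + x) n1 := by
  rw [pyRange_zero_two, List.foldl_map]
  exact fold_evens_aux d n1

theorem fold_range_odds (d : List Int) (n2 : Int) :
    (PySem.List.pyRange 1 (d.length : Int) 2).foldl
        (fun acc i => acc * 10 + PySem.List.pyGetD d i 0) n2
      = (pvOdds d).foldl (fun a x => a * 10 + x) n2 := by
  rw [pyRange_one_two, List.foldl_map]
  exact fold_odds_aux d n2

theorem ordered_eq_map_neg_popSeq (input_list : List Int) :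
    PySem.List.sorted input_list (fun x => x) true
      = (pvPopSeq (pvHeapify (input_list.map (fun x => -x)))).map (fun x => -x) := by
  obtain ⟨_, PH, HH⟩ := pvHeapify_spec (input_list.map (fun x => -x))
  obtain ⟨PS, SS⟩ := pvPopSeq_spec _ HH
  have hmapmap : (input_list.map (fun x : Int => -x)).map (fun x : Int => -x) = input_list := by
    simp
  have hperm : (PySem.List.sorted input_list (fun x => x) true).Perm
      ((pvPopSeq (pvHeapify (input_list.map (fun x => -x)))).map (fun x => -x)) := by
    refine (PySem.List.sorted_perm input_list (fun x => x) true).trans ?_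
    have h1 := (PS.trans PH).map (fun x : Int => -x)
    rw [hmapmap] at h1
    exact h1.symm
  have hpw1 : ((PySem.List.sorted input_list (fun x => x) true).reverse).Pairwise (· ≤ ·) := by
    rw [List.pairwise_reverse]
    exact PySem.List.sorted_pairwise_rev input_list (fun x => x)
  have hpw2 : (((pvPopSeq (pvHeapify (input_list.map (fun x => -x)))).map
      (fun x : Int => -x)).reverse).Pairwise (· ≤ ·) := by
    rw [List.pairwise_reverse, List.pairwise_map]
    exact SS.imp (fun hab => by omega)
  have hrev : (PySem.List.sorted input_list (fun x => x) true).reverse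
      = ((pvPopSeq (pvHeapify (input_list.map (fun x => -x)))).map (fun x => -x)).reverse := by
    refine PySem.List.eq_of_perm_of_pairwise_le_of_injective (fun x : Int => x)
      (fun a b hab => hab) ?_ hpw1 hpw2
    exact ((List.reverse_perm _).trans hperm).trans (List.reverse_perm _).symm
  exact List.reverse_injective hrev

-- ===== VERDICT (by name: the statement is the Claim_ definition above) =====
theorem rearrange_digits_spec : Claim_equal_rearrange_digits := by
  intro input_list _
  show rearrange_digits input_list = rearrange_digits_alt input_list
  have hA : rearrange_digits input_list
      = altF (pvPopSeq (pvHeapify (input_list.map (fun x => -x)))) 0 0 :=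
    pvPopLoop_eq_altF _ _ (Nat.le_refl _) 0 0
  have hB : rearrange_digits_alt input_list
      = ((PySem.List.pyRange 0 ((PySem.List.sorted input_list (fun x => x) true).length : Int) 2).foldl
            (fun acc i => acc * 10 + PySem.List.pyGetD (PySem.List.sorted input_list (fun x => x) true) i 0) 0,
         (PySem.List.pyRange 1 ((PySem.List.sorted input_list (fun x => x) true).length : Int) 2).foldl
            (fun acc i => acc * 10 + PySem.List.pyGetD (PySem.List.sorted input_list (fun x => x) true) i 0) 0) := rfl
  rw [hA, hB, fold_range_evens, fold_range_odds, ordered_eq_map_neg_popSeq, altF_eq]
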